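-- pv_equiv track=rewrite | github.com/coffeebearchen/video_agent2 | scene_planner.py | merge_parts_evenly
-- ===== SOURCE A (Python) =====
-- def merge_parts_evenly(parts: list, target_count: int) -> list:
--     if target_count <= 0:
--         return []
--     if not parts:
--         return []
--     if len(parts) <= target_count:
--         return parts[:]
--
--     merged_parts = []
--     total = len(parts)
--     start = 0
--     for index in range(target_count):
--         remaining_parts = total - start
--         remaining_slots = target_count - index
--         take_count = max(1, remaining_parts // remaining_slots)
--         if remaining_parts % remaining_slots != 0:
--             take_count += 1
--         chunk = parts[start:start + take_count]
--         merged_parts.append("".join(chunk).strip())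
--         start += take_count
--     return merged_parts
-- ===== SOURCE B (Python) =====
-- def merge_parts_evenly(parts: list, target_count: int) -> list:
--     if target_count <= 0 or not parts:
--         return []
--     n = len(parts)
--     if n <= target_count:
--         return parts[:]
--     base, extra = divmod(n, target_count)
--
--     def bound(i):
--         return i * base + min(i, extra)
--
--     return ["".join(parts[bound(i):bound(i + 1)]).strip()
--             for i in range(target_count)]
-- ===== Notes on version B (the rewrite author's own statement) =====
-- stated objective: simpler
-- what changed: Replaces A's sequential greedy loop (per-step ceiling division on mutable remaining/slots state) with closed-form divmod chunk boundaries bound(i)=i*base+min(i,extra) and a stateless comprehension over range(target_count).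
import Mathlib
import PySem

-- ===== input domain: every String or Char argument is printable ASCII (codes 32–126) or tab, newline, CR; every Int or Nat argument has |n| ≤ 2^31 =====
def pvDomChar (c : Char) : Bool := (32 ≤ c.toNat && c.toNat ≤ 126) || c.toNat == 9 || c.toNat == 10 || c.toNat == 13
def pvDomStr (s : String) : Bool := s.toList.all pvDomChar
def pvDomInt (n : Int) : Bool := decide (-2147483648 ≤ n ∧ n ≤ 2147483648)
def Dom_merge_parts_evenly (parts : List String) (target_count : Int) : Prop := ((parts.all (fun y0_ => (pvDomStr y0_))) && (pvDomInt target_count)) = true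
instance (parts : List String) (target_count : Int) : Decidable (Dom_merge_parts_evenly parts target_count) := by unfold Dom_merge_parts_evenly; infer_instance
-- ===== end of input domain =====

-- B replaces A's greedy per-step ceiling division by closed-form divmod chunk boundaries (objective: simpler).

-- ===== PORT A =====
-- loop body of A's `for index in range(target_count)` (state = (merged_parts, start))
def mpeStepA (parts : List String) (total target_count : Int)
    (st : List String × Int) (index : Int) : List String × Int :=
  let remaining_parts := total - st.2
  let remaining_slots := target_count - index
  let take0 := max 1 (PySem.Int.floordiv remaining_parts remaining_slots)
  let take_count := if PySem.Int.mod remaining_parts remaining_slots ≠ 0 then take0 + 1 else take0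
  let chunk := PySem.List.slice parts (some st.2) (some (st.2 + take_count))
  (st.1 ++ [PySem.Str.strip (PySem.Str.join "" chunk)], st.2 + take_count)

def merge_parts_evenly (parts : List String) (target_count : Int) : List String :=
  if target_count ≤ 0 then []
  else if parts = [] then []
  else if (parts.length : Int) ≤ target_count then parts
  else
    let total : Int := parts.length
    ((PySem.List.pyRange 0 target_count 1).foldl (mpeStepA parts total target_count) ([], 0)).1

-- ===== PORT B =====
-- closed-form chunk boundary: bound(i) = i*base + min(i, extra)
def mpeBound (base extra i : Int) : Int := i * base + min i extra

def mpeChunk (parts : List String) (base extra i : Int) : String :=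
  PySem.Str.strip (PySem.Str.join ""
    (PySem.List.slice parts (some (mpeBound base extra i)) (some (mpeBound base extra (i+1)))))

def merge_parts_evenly_alt (parts : List String) (target_count : Int) : List String :=
  if target_count ≤ 0 ∨ parts = [] then []
  else if (parts.length : Int) ≤ target_count then parts
  else
    let n : Int := parts.length
    let base := PySem.Int.floordiv n target_count
    let extra := PySem.Int.mod n target_count
    (PySem.List.pyRange 0 target_count 1).map (mpeChunk parts base extra)

-- ===== PRECONDITION & SPEC =====
def Spec_merge_parts_evenly (parts : List String) (target_count : Int) (out : List String) : Prop := out = merge_parts_evenly_alt parts target_count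
instance (parts : List String) (target_count : Int) (out : List String) : Decidable (Spec_merge_parts_evenly parts target_count out) := by unfold Spec_merge_parts_evenly; infer_instance

-- ===== CLAIM (what is proved, stated in full; the proofs are below) =====
def Claim_equal_merge_parts_evenly : Prop := ∀ (parts : List String) (target_count : Int), Dom_merge_parts_evenly parts target_count → Spec_merge_parts_evenly parts target_count (merge_parts_evenly parts target_count)

-- ===== LEMMAS AND PROOFS =====

-- One step of A's loop, at start = bound(i), produces chunk i and advances to bound(i+1).
lemma mpe_step_eq (parts : List String) (t n base extra i : Int) (acc : List String)
    (hbe : n = base * t + extra) (h0e : 0 ≤ extra) (het : extra < t) (hb1 : 1 ≤ base)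
    (hi0 : 0 ≤ i) (hit : i < t) :
    mpeStepA parts n t (acc, mpeBound base extra i) i
      = (acc ++ [mpeChunk parts base extra i], mpeBound base extra (i+1)) := by
  have hslots : (0:Int) < t - i := by omega
  have hrem : n - mpeBound base extra i = (extra - min i extra) + base * (t - i) := by
    simp only [mpeBound]; ring_nf; omega
  set r : Int := extra - min i extra with hr
  have hr0 : 0 ≤ r := by rw [hr]; rcases le_total i extra with h | h <;> simp [h]
  have hrlt : r < t - i := by
    rw [hr]; rcases le_total i extra with h | h
    · rw [min_eq_left h]; omega
    · rw [min_eq_right h]; omega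
  have hfd : PySem.Int.floordiv (n - mpeBound base extra i) (t - i) = base := by
    rw [PySem.Int.floordiv_eq_ediv_of_pos hslots, hrem,
      Int.add_mul_ediv_right _ _ (by omega : t - i ≠ 0),
      Int.ediv_eq_zero_of_lt hr0 hrlt]
    omega
  have hmd : PySem.Int.mod (n - mpeBound base extra i) (t - i) = r := by
    rw [PySem.Int.mod_eq_emod_of_pos hslots, hrem, mul_comm base (t - i), Int.add_mul_emod_self_left,
      Int.emod_eq_of_lt hr0 hrlt]
  have hmax : max 1 base = base := max_eq_right hb1
  have hexp : (i + 1) * base = i * base + base := by ring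
  have hsum : mpeBound base extra i + (if r ≠ 0 then base + 1 else base)
      = mpeBound base extra (i + 1) := by
    simp only [mpeBound]
    rcases lt_or_ge i extra with h | h
    · have hrne : r ≠ 0 := by rw [hr, min_eq_left (le_of_lt h)]; omega
      rw [if_pos hrne, min_eq_left (le_of_lt h), min_eq_left (by omega : i + 1 ≤ extra)]
      omega
    · have hre : r = 0 := by rw [hr, min_eq_right h]; omega
      rw [if_neg (by simp [hre]), min_eq_right h, min_eq_right (by omega : extra ≤ i + 1)]
      omega
  simp only [mpeStepA, mpeChunk, hfd, hmd, hmax, hsum]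

-- A's loop over [i, t) from start = bound(i) appends exactly the chunks i, i+1, …, t-1.
lemma mpe_loop (parts : List String) (t n base extra : Int)
    (hbe : n = base * t + extra) (h0e : 0 ≤ extra) (het : extra < t) (hb1 : 1 ≤ base) :
    ∀ (k : Nat) (i : Int), 0 ≤ i → i + k = t → ∀ acc : List String,
      (PySem.List.pyRange i t 1).foldl (mpeStepA parts n t) (acc, mpeBound base extra i)
        = (acc ++ (PySem.List.pyRange i t 1).map (mpeChunk parts base extra),
           mpeBound base extra t) := by
  intro k
  induction k with
  | zero =>
    intro i hi0 hik acc
    have : t ≤ i := by omega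
    have hi : i = t := by omega
    subst hi
    rw [PySem.List.pyRange_one_eq_nil le_rfl]
    simp
  | succ m ih =>
    intro i hi0 hik acc
    have hit : i < t := by omega
    rw [PySem.List.pyRange_one_cons hit]
    simp only [List.foldl_cons, List.map_cons]
    rw [mpe_step_eq parts t n base extra i acc hbe h0e het hb1 hi0 hit]
    rw [ih (i+1) (by omega) (by omega) (acc ++ [mpeChunk parts base extra i])]
    simp

-- ===== VERDICT (by name: the statement is the Claim_ definition above) =====
theorem merge_parts_evenly_spec : Claim_equal_merge_parts_evenly := by
  intro parts t _
  show merge_parts_evenly parts t = merge_parts_evenly_alt parts t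
  unfold merge_parts_evenly merge_parts_evenly_alt
  by_cases h1 : t ≤ 0
  · simp [h1]
  by_cases h2 : parts = []
  · simp [h1, h2]
  by_cases h3 : (parts.length : Int) ≤ t
  · simp [h1, h2, h3]
  · simp only [if_neg h1, if_neg h2, if_neg h3, if_neg (show ¬(t ≤ 0 ∨ parts = []) by tauto)]
    set n : Int := (parts.length : Int) with hn
    have ht : 0 < t := by omega
    have hnt : t < n := by omega
    set base := PySem.Int.floordiv n t with hbase
    set extra := PySem.Int.mod n t with hextra
    have hbe : n = base * t + extra := by
      rw [hbase, hextra, PySem.Int.floordiv_eq_ediv_of_pos ht, PySem.Int.mod_eq_emod_of_pos ht]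
      rw [mul_comm]
      exact (Int.mul_ediv_add_emod n t).symm
    have h0e : 0 ≤ extra := by
      rw [hextra, PySem.Int.mod_eq_emod_of_pos ht]
      exact Int.emod_nonneg n (by omega)
    have het : extra < t := by
      rw [hextra, PySem.Int.mod_eq_emod_of_pos ht]
      exact Int.emod_lt_of_pos n ht
    have hb1 : 1 ≤ base := by
      rw [hbase, PySem.Int.le_floordiv_iff_mul_le ht]
      omega
    have h00 : mpeBound base extra 0 = 0 := by
      simp [mpeBound, min_eq_left h0e]
    have := mpe_loop parts t n base extra hbe h0e het hb1 t.toNat 0 le_rfl (by omega) []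
    rw [h00] at this
    rw [this]
    simp
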